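-- pv_equiv track=rewrite | github.com/MrBrantCode/unitest_baseline | mut_generate/mist_train_cf/cf_92195/solution.py | check_anagram_and_palindrome
-- ===== SOURCE A (Python) =====
-- def check_anagram_and_palindrome(string1, string2):
--     # Convert the strings to lowercase and remove spaces and punctuation
--     string1 = ''.join(e for e in string1 if e.isalnum()).lower()
--     string2 = ''.join(e for e in string2 if e.isalnum()).lower()
--
--     # Check if the strings are anagrams
--     if sorted(string1) != sorted(string2):
--         return False
--
--     # Check if the strings are palindromes
--     if string1 != string1[::-1] or string2 != string2[::-1]:
--         return False
--
--     return True
-- ===== SOURCE B (Python) =====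
-- def _is_palindrome(s):
--     # two-pointer scan instead of comparing s with s[::-1]
--     i, j = 0, len(s) - 1
--     while i < j:
--         if s[i] != s[j]:
--             return False
--         i += 1
--         j -= 1
--     return True
--
--
-- def check_anagram_and_palindrome(string1, string2):
--     s1 = ''.join(e for e in string1 if e.isalnum()).lower()
--     s2 = ''.join(e for e in string2 if e.isalnum()).lower()
--     # anagram check by per-character counts over the union of characters
--     # (no sorting)
--     for c in set(s1 + s2):
--         if s1.count(c) != s2.count(c):
--             return False
--     return _is_palindrome(s1) and _is_palindrome(s2)
-- ===== Notes on version B (the rewrite author's own statement) =====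
-- stated objective: faster
-- what changed: Replaces both sort-and-compare anagram tests with a per-character count comparison over the set of occurring characters, and replaces both slice-reversal palindrome tests with a single two-pointer helper that stops at the first mismatch.
import Mathlib
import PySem

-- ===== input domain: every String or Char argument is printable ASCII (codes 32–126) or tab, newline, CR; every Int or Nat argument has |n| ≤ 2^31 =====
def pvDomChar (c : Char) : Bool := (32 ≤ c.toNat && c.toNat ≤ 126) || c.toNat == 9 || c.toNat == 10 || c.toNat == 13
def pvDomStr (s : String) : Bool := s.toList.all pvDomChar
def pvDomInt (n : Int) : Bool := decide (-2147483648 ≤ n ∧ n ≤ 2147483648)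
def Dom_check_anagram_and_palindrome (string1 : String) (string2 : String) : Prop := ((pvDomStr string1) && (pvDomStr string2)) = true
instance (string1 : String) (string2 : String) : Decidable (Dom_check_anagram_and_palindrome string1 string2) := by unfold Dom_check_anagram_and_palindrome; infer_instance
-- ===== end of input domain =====

-- B replaces the two sort-and-compare anagram tests by per-character count comparison
-- over the set of occurring characters, and the two slice-reversal palindrome tests by
-- a single two-pointer helper that stops at the first mismatch (measured faster by the
-- timing run; same exact result).

-- ===== PORT A =====
def check_anagram_and_palindrome (string1 : String) (string2 : String) : Bool :=
  -- string1 = ''.join(e for e in string1 if e.isalnum()).lower()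
  let s1 : List Char := PySem.Chars.lower ((string1.toList).filter (fun e => PySem.Chars.isalnum e))
  let s2 : List Char := PySem.Chars.lower ((string2.toList).filter (fun e => PySem.Chars.isalnum e))
  -- if sorted(string1) != sorted(string2): return False
  if PySem.List.sorted s1 (fun x => x) ≠ PySem.List.sorted s2 (fun x => x) then false
  -- if string1 != string1[::-1] or string2 != string2[::-1]: return False
  else if s1 ≠ (PySem.List.slice? s1 none none (-1)).getD [] ∨
          s2 ≠ (PySem.List.slice? s2 none none (-1)).getD [] then false
  else true

-- ===== PORT B =====
-- two-pointer palindrome scan: i from the left, j from the right, stop at first mismatch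
def pvPalAux (s : List Char) (i j : Nat) : Bool :=
  if i < j then
    if PySem.List.pyGetD s (i : Int) ' ' ≠ PySem.List.pyGetD s (j : Int) ' ' then false
    else pvPalAux s (i + 1) (j - 1)
  else true
termination_by j - i

def pvIsPalindrome (s : List Char) : Bool := pvPalAux s 0 (s.length - 1)

def check_anagram_and_palindrome_alt (string1 : String) (string2 : String) : Bool :=
  let s1 : List Char := PySem.Chars.lower ((string1.toList).filter (fun e => PySem.Chars.isalnum e))
  let s2 : List Char := PySem.Chars.lower ((string2.toList).filter (fun e => PySem.Chars.isalnum e))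
  -- for c in set(s1 + s2): if s1.count(c) != s2.count(c): return False
  if (PySem.Set.ofList (s1 ++ s2)).all (fun c => PySem.List.count s1 c == PySem.List.count s2 c) then
    pvIsPalindrome s1 && pvIsPalindrome s2
  else false

-- ===== PRECONDITION & SPEC =====
def Spec_check_anagram_and_palindrome (string1 : String) (string2 : String) (out : Bool) : Prop := out = check_anagram_and_palindrome_alt string1 string2
instance (string1 : String) (string2 : String) (out : Bool) : Decidable (Spec_check_anagram_and_palindrome string1 string2 out) := by unfold Spec_check_anagram_and_palindrome; infer_instance

-- ===== CLAIM (what is proved, stated in full; the proofs are below) =====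
def Claim_equal_check_anagram_and_palindrome : Prop := ∀ (string1 : String) (string2 : String), Dom_check_anagram_and_palindrome string1 string2 → Spec_check_anagram_and_palindrome string1 string2 (check_anagram_and_palindrome string1 string2)

-- ===== LEMMAS AND PROOFS =====


-- invariant of the two-pointer scan
lemma pvPalAux_iff (s : List Char) (i j : Nat) :
    pvPalAux s i j = true ↔ ∀ k, i ≤ k → k ≤ j → s.getD k ' ' = s.getD (i + j - k) ' ' := by
  fun_induction pvPalAux s i j with
  | case1 i j hij hne =>
    simp only [PySem.List.pyGetD_natCast] at hne
    constructor
    · intro h; exact absurd h (by simp)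
    · intro h
      have h2 := h i le_rfl (le_of_lt hij)
      have hj : i + j - i = j := by omega
      rw [hj] at h2
      exact absurd h2 hne
  | case2 i j hij hne ih =>
    simp only [PySem.List.pyGetD_natCast, not_not] at hne
    rw [ih]
    constructor
    · intro h k hik hkj
      rcases eq_or_lt_of_le hik with heq | hik'
      · subst heq
        have hj : i + j - i = j := by omega
        rw [hj]; exact hne
      · rcases eq_or_lt_of_le hkj with heq | hkj'
        · subst heq
          have hi : i + k - k = i := by omega
          rw [hi]; exact hne.symm
        · have h2 := h k (by omega) (by omega)
          have harith : i + 1 + (j - 1) - k = i + j - k := by omega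
          rw [harith] at h2; exact h2
    · intro h k hik hkj
      have harith : i + 1 + (j - 1) - k = i + j - k := by omega
      rw [harith]
      exact h k (by omega) (by omega)
  | case3 i j hij =>
    constructor
    · intro _ k hik hkj
      have hk2 : i + j - k = k := by omega
      rw [hk2]
    · intro _; rfl

lemma pvIsPalindrome_iff (s : List Char) : pvIsPalindrome s = true ↔ s = s.reverse := by
  unfold pvIsPalindrome
  rw [pvPalAux_iff]
  constructor
  · intro h
    apply List.ext_getElem (by simp)
    intro k h1 h2
    have hk : k ≤ s.length - 1 := by omega
    have h3 := h k (Nat.zero_le _) hk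
    have hz : 0 + (s.length - 1) - k = s.length - 1 - k := by omega
    rw [hz, List.getD_eq_getElem s ' ' h1,
        List.getD_eq_getElem s ' ' (by omega : s.length - 1 - k < s.length)] at h3
    rw [List.getElem_reverse]
    exact h3
  · intro h k _ hk
    rcases Nat.eq_zero_or_pos s.length with hlen | hlen
    · rw [List.length_eq_zero_iff.mp hlen]; rfl
    · have h1 : k < s.length := by omega
      have h2 : 0 + (s.length - 1) - k < s.length := by omega
      have hz : 0 + (s.length - 1) - k = s.length - 1 - k := by omega
      rw [List.getD_eq_getElem s ' ' h1, List.getD_eq_getElem s ' ' h2]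
      have h4 : s[k] = s.reverse[k]'(by simpa using h1) := List.getElem_of_eq h h1
      rw [List.getElem_reverse] at h4
      simp only [hz]
      exact h4

lemma pvIsPalindrome_eq_decide (s : List Char) : pvIsPalindrome s = decide (s = s.reverse) := by
  cases hb : pvIsPalindrome s with
  | true => exact (decide_eq_true ((pvIsPalindrome_iff s).mp hb)).symm
  | false =>
    by_cases h : s = s.reverse
    · exact absurd ((pvIsPalindrome_iff s).mpr h) (by rw [hb]; exact Bool.false_ne_true)
    · exact (decide_eq_false h).symm

lemma pvCounts_iff (s1 s2 : List Char) :
    ((PySem.Set.ofList (s1 ++ s2)).all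
      (fun c => PySem.List.count s1 c == PySem.List.count s2 c)) = true ↔ s1.Perm s2 := by
  rw [List.all_eq_true]
  constructor
  · intro h
    rw [List.perm_iff_count]
    intro c
    by_cases hc : c ∈ s1 ++ s2
    · have h2 := h c ((PySem.Set.mem_ofList _ _).mpr hc)
      simpa [PySem.List.count_eq] using h2
    · rw [List.mem_append, not_or] at hc
      rw [List.count_eq_zero_of_not_mem hc.1, List.count_eq_zero_of_not_mem hc.2]
  · intro h c _
    simp [PySem.List.count_eq, h.count_eq]

-- the two decision procedures agree on arbitrary (already normalized) char lists
lemma pvMain (s1 s2 : List Char) :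
    (if PySem.List.sorted s1 (fun x => x) ≠ PySem.List.sorted s2 (fun x => x) then false
     else if s1 ≠ (PySem.List.slice? s1 none none (-1)).getD [] ∨
             s2 ≠ (PySem.List.slice? s2 none none (-1)).getD [] then false
     else true) =
    (if (PySem.Set.ofList (s1 ++ s2)).all
          (fun c => PySem.List.count s1 c == PySem.List.count s2 c) then
       pvIsPalindrome s1 && pvIsPalindrome s2
     else false) := by
  have hrev1 : (PySem.List.slice? s1 none none (-1)).getD [] = s1.reverse := by
    rw [PySem.List.slice?_none_none_neg_one]; rfl
  have hrev2 : (PySem.List.slice? s2 none none (-1)).getD [] = s2.reverse := by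
    rw [PySem.List.slice?_none_none_neg_one]; rfl
  rw [hrev1, hrev2, pvIsPalindrome_eq_decide, pvIsPalindrome_eq_decide]
  by_cases hperm : s1.Perm s2
  · have hsort : PySem.List.sorted s1 (fun x => x) = PySem.List.sorted s2 (fun x => x) :=
      (PySem.List.sorted_id_eq_sorted_id_iff_perm _ _).mpr hperm
    have hcnt := (pvCounts_iff s1 s2).mpr hperm
    rw [if_neg (not_not_intro hsort), if_pos hcnt]
    by_cases h1 : s1 = s1.reverse
    · by_cases h2 : s2 = s2.reverse
      · rw [if_neg (by push Not; exact ⟨h1, h2⟩), decide_eq_true h1, decide_eq_true h2]; rfl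
      · rw [if_pos (Or.inr h2), decide_eq_false h2]; simp
    · rw [if_pos (Or.inl h1), decide_eq_false h1]; simp
  · have hsort : PySem.List.sorted s1 (fun x => x) ≠ PySem.List.sorted s2 (fun x => x) :=
      fun h => hperm ((PySem.List.sorted_id_eq_sorted_id_iff_perm _ _).mp h)
    have hcnt : ((PySem.Set.ofList (s1 ++ s2)).all
        (fun c => PySem.List.count s1 c == PySem.List.count s2 c)) = false := by
      cases hb : ((PySem.Set.ofList (s1 ++ s2)).all
          (fun c => PySem.List.count s1 c == PySem.List.count s2 c)) with
      | false => rfl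
      | true => exact absurd ((pvCounts_iff s1 s2).mp hb) hperm
    rw [if_pos hsort, hcnt]
    simp

-- ===== VERDICT (by name: the statement is the Claim_ definition above) =====
theorem check_anagram_and_palindrome_spec : Claim_equal_check_anagram_and_palindrome := by
  intro string1 string2 _
  unfold Spec_check_anagram_and_palindrome
  simp only [check_anagram_and_palindrome, check_anagram_and_palindrome_alt]
  exact pvMain _ _
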